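-- pv_equiv track=rewrite | github.com/PrathameshJadhav30/Accenture-PYQ-Coding-Questions | 009-Move Hyphens to Front/MoveHyphenstoFront.py | MoveHyphen
-- ===== SOURCE A (Python) =====
-- def MoveHyphen(s: str) -> str:
--     if s is None:
--         return None
--
--     hyphen_part = ''
--     other_part = ''
--
--     for char in s:
--         if char == '-':
--             hyphen_part += '-'
--         else:
--             other_part += char
--
--     return hyphen_part + other_part
-- ===== SOURCE B (Python) =====
-- def MoveHyphen(s: str) -> str:
--     if s is None:
--         return None
--     return '-' * s.count('-') + s.replace('-', '')
-- ===== Notes on version B (the rewrite author's own statement) =====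
-- stated objective: faster
-- what changed: Replaced the explicit character loop with two string accumulators by a closed-form hyphen prefix sized by count plus replace for the remaining characters.
import Mathlib
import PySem

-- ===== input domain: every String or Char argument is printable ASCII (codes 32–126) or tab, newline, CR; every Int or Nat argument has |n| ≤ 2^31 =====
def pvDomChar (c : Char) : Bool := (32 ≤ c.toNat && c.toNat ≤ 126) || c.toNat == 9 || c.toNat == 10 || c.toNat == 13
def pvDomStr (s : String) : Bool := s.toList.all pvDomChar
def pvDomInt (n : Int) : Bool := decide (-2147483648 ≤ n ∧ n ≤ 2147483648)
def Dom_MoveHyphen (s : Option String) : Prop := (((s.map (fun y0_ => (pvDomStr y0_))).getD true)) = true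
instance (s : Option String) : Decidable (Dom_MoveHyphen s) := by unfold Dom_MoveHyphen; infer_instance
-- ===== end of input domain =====

-- B replaces A's accumulating character loop with a closed-form hyphen prefix (count) plus replace; simpler.


-- ===== PORT A =====
-- the loop: two accumulators, appending one char at a time
def MoveHyphen (s : Option String) : Option String :=
  match s with
  | none => none
  | some str =>
    let p := str.toList.foldl
      (fun (acc : List Char × List Char) c =>
        if c = '-' then (acc.1 ++ ['-'], acc.2) else (acc.1, acc.2 ++ [c]))
      ([], [])
    some (String.mk (p.1 ++ p.2))

-- ===== PORT B =====
-- '-' * s.count('-') + s.replace('-', '')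
def MoveHyphen_alt (s : Option String) : Option String :=
  match s with
  | none => none
  | some str =>
    some (String.mk (List.replicate (str.toList.count '-') '-'
                     ++ str.toList.filter (fun c => c ≠ '-')))

-- ===== PRECONDITION & SPEC =====
def Spec_MoveHyphen (s : Option String) (out : Option String) : Prop := out = MoveHyphen_alt s
instance (s : Option String) (out : Option String) : Decidable (Spec_MoveHyphen s out) := by unfold Spec_MoveHyphen; infer_instance

-- ===== CLAIM (what is proved, stated in full; the proofs are below) =====
def Claim_equal_MoveHyphen : Prop := ∀ (s : Option String), Dom_MoveHyphen s → Spec_MoveHyphen s (MoveHyphen s)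

-- ===== LEMMAS AND PROOFS =====
theorem moveHyphen_fold_eq (l : List Char) (h o : List Char) :
    l.foldl
      (fun (acc : List Char × List Char) c =>
        if c = '-' then (acc.1 ++ ['-'], acc.2) else (acc.1, acc.2 ++ [c]))
      (h, o)
    = (h ++ List.replicate (l.count '-') '-', o ++ l.filter (fun c => c ≠ '-')) := by
  induction l generalizing h o with
  | nil => simp
  | cons c t ih =>
    by_cases hc : c = '-'
    · subst hc
      simp [List.foldl, ih, List.replicate_succ]
    · simp [List.foldl, hc, ih]

-- ===== VERDICT (by name: the statement is the Claim_ definition above) =====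
theorem MoveHyphen_spec : Claim_equal_MoveHyphen := by
  intro s _
  unfold Spec_MoveHyphen MoveHyphen MoveHyphen_alt
  cases s with
  | none => rfl
  | some str => simp [moveHyphen_fold_eq]
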